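-- pv_equiv track=rewrite | github.com/GoatAndOwl/EntityFall-v2.2.0 | Core.py | uncompose_msg
-- ===== SOURCE A (Python) =====
-- def uncompose_msg(msg):
-- 	a = []
-- 	x = 0
-- 	y = 0
-- 	z = 0
-- 	for char in msg:
-- 		if char == ']' or char == '}':
-- 			x = 1
-- 		elif x and (char == '[' or char == '{'):
-- 			if z == 0:
-- 				a.append(msg[:y])
-- 			else:
-- 				a.append(msg[z:y])
-- 			z = y
-- 			x = 0
-- 		else:
-- 			x = 0
-- 		y += 1
-- 	a.append(msg[z:y])
-- 	return(a)
-- ===== SOURCE B (Python) =====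
-- def uncompose_msg(msg):
-- 	parts = []
-- 	while True:
-- 		cut = None
-- 		for i in range(1, len(msg)):
-- 			if msg[i - 1] in ']}' and msg[i] in '[{':
-- 				cut = i
-- 				break
-- 		if cut is None:
-- 			parts.append(msg)
-- 			return parts
-- 		parts.append(msg[:cut])
-- 		msg = msg[cut:]
-- ===== Notes on version B (the rewrite author's own statement) =====
-- stated objective: alternative
-- what changed: A's single forward pass with a state machine (flag x, running index y, last-cut index z, accumulating as it goes) is replaced by a peel-off loop: repeatedly scan the remaining string for its first close/open bracket boundary, chop that head segment off, and continue on the shrinking remainder.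
import Mathlib
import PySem

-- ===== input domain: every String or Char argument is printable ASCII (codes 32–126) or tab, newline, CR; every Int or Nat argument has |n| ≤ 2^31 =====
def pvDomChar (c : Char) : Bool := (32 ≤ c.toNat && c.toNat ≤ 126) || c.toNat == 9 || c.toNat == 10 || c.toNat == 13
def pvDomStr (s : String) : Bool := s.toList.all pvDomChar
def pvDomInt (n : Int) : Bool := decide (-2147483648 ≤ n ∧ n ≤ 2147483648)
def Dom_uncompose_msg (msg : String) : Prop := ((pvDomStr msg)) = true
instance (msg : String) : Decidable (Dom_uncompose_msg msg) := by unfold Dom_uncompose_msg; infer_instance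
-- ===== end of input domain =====

-- B replaces A's one-pass bracket state machine by a peel-off loop that repeatedly finds the
-- first close/open boundary of the remainder and chops the head segment off (objective: alternative).

-- ===== PORT A =====
def uncompose_msg (msg : String) : List String :=
  let st := msg.toList.foldl
    (fun (s : List String × Int × Int × Int) char =>
      match s with
      | (a, x, y, z) =>
        if char = ']' ∨ char = '}' then (a, 1, y + 1, z)
        else if x ≠ 0 ∧ (char = '[' ∨ char = '{') then
          ((if z = 0 then a ++ [PySem.Str.slice msg none (some y)]
            else a ++ [PySem.Str.slice msg (some z) (some y)]), 0, y + 1, y)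
        else (a, 0, y + 1, z))
    ([], 0, 0, 0)
  st.1 ++ [PySem.Str.slice msg (some st.2.2.2) (some st.2.2.1)]

-- ===== PORT B =====
-- inner 'for i in range(1, len(msg)): if msg[i-1] in ']}' and msg[i] in '[{': cut = i; break'
def altCut (cs : List Char) : Option Nat :=
  (List.range' 1 (cs.length - 1)).find? (fun i =>
    ((cs.getD (i - 1) ' ' == ']') || (cs.getD (i - 1) ' ' == '}')) &&
    ((cs.getD i ' ' == '[') || (cs.getD i ' ' == '{')))

-- termination fact the port cites: a found cut lies strictly inside the string
theorem pvAltCutBounds {cs : List Char} {i : Nat} (h : altCut cs = some i) :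
    1 ≤ i ∧ i < cs.length := by
  have hm := List.mem_of_find?_eq_some h
  rw [List.mem_range'_1] at hm
  omega

-- outer 'while True' loop: chop the head segment off, continue on the remainder
def altGo (cs : List Char) (parts : List String) : List String :=
  match h : altCut cs with
  | none => parts ++ [String.ofList cs]
  | some i => altGo (cs.drop i) (parts ++ [String.ofList (cs.take i)])
  termination_by cs.length
  decreasing_by
    have := pvAltCutBounds h
    simp only [List.length_drop]
    omega

def uncompose_msg_alt (msg : String) : List String := altGo msg.toList []

-- ===== PRECONDITION & SPEC =====
def Spec_uncompose_msg (msg : String) (out : List String) : Prop := out = uncompose_msg_alt msg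
instance (msg : String) (out : List String) : Decidable (Spec_uncompose_msg msg out) := by unfold Spec_uncompose_msg; infer_instance

-- ===== CLAIM (what is proved, stated in full; the proofs are below) =====
def Claim_equal_uncompose_msg : Prop := ∀ (msg : String), Dom_uncompose_msg msg → Spec_uncompose_msg msg (uncompose_msg msg)

-- ===== LEMMAS AND PROOFS =====

def pvIsCl (c : Char) : Bool := c == ']' || c == '}'
def pvIsOp (c : Char) : Bool := c == '[' || c == '{'
def pvP (cs : List Char) (i : Nat) : Bool := pvIsCl (cs.getD (i - 1) ' ') && pvIsOp (cs.getD i ' ')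
def pvCut (cs : List Char) (i : Nat) : Bool := decide (1 ≤ i) && pvP cs i
def pvCuts (cs : List Char) (k : Nat) : List Nat := (List.range k).filter (pvCut cs)
def pvBnds (cs : List Char) (k : Nat) : List Int := 0 :: (pvCuts cs k).map (Nat.cast)
def pvSegs (msg : String) (bs : List Int) : List String :=
  (bs.zip bs.tail).map (fun p => PySem.Str.slice msg (some p.1) (some p.2))
-- B's result, phrased on absolute cut positions with a running offset
def pvChunksA (cs : List Char) (off : Nat) : List Nat → List String
  | [] => [String.ofList (cs.drop off)]
  | c :: rest => String.ofList ((cs.drop off).take (c - off)) :: pvChunksA cs c rest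
-- slices written as take/drop of the char list
def pvSegsTD (cs : List Char) (bs : List Nat) : List String :=
  (bs.zip bs.tail).map (fun p => String.ofList ((cs.drop p.1).take (p.2 - p.1)))

theorem pvZipTailApp (x : Int) (t : List Int) (m : Int) :
    ((x :: t) ++ [m]).zip ((x :: t) ++ [m]).tail
      = (x :: t).zip t ++ [((x :: t).getLastD 0, m)] := by
  induction t generalizing x with
  | nil => simp
  | cons y u ih =>
    have := ih y
    simp only [List.cons_append, List.zip_cons_cons, List.tail_cons] at *
    rw [this]
    simp

theorem pvSegsApp (msg : String) (x : Int) (t : List Int) (m : Int) :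
    pvSegs msg ((x :: t) ++ [m])
      = pvSegs msg (x :: t) ++ [PySem.Str.slice msg (some ((x :: t).getLastD 0)) (some m)] := by
  unfold pvSegs
  rw [pvZipTailApp x t m]
  simp

theorem pvCutsSucc (cs : List Char) (k : Nat) :
    pvCuts cs (k + 1) = pvCuts cs k ++ if pvCut cs k then [k] else [] := by
  simp [pvCuts, List.range_succ, List.filter_append]
  split_ifs with h <;> simp [List.filter, h]

theorem pvInvA (msg : String) (k : Nat) (hk : k ≤ msg.toList.length) :
    (msg.toList.take k).foldl
      (fun (s : List String × Int × Int × Int) char =>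
        match s with
        | (a, x, y, z) =>
          if char = ']' ∨ char = '}' then (a, 1, y + 1, z)
          else if x ≠ 0 ∧ (char = '[' ∨ char = '{') then
            ((if z = 0 then a ++ [PySem.Str.slice msg none (some y)]
              else a ++ [PySem.Str.slice msg (some z) (some y)]), 0, y + 1, y)
          else (a, 0, y + 1, z))
      ([], 0, 0, 0) =
    (pvSegs msg (pvBnds msg.toList k),
     (if 1 ≤ k ∧ pvIsCl (msg.toList.getD (k - 1) ' ') then (1 : Int) else 0),
     (k : Int),
     (pvBnds msg.toList k).getLastD 0) := by
  induction k with
  | zero => simp [pvCuts, pvBnds, pvSegs]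
  | succ k ih =>
    have hk' : k < msg.toList.length := by omega
    have hg : msg.toList[k]? = some (msg.toList.getD k ' ') := by
      rw [List.getElem?_eq_getElem hk', List.getD_eq_getElem _ _ hk']
    rw [List.take_succ, hg]
    rw [List.foldl_append, ih (by omega)]
    simp only [Option.toList_some, List.foldl_cons, List.foldl_nil, Nat.add_sub_cancel]
    by_cases hc1 : msg.toList.getD k ' ' = ']' ∨ msg.toList.getD k ' ' = '}'
    · -- closing bracket: x becomes 1, no cut at k
      have hop : pvIsOp (msg.toList.getD k ' ') = false := by
        rcases hc1 with h | h <;> rw [h] <;> decide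
      have hcl : pvIsCl (msg.toList.getD k ' ') = true := by
        rcases hc1 with h | h <;> rw [h] <;> decide
      have hcut : pvCut msg.toList k = false := by unfold pvCut pvP; rw [hop]; simp
      have hb : pvBnds msg.toList (k + 1) = pvBnds msg.toList k := by
        simp [pvBnds, pvCutsSucc, hcut]
      rw [if_pos hc1, hb,
        if_pos (show 1 ≤ k + 1 ∧ pvIsCl (msg.toList.getD k ' ') = true from ⟨by omega, hcl⟩),
        Nat.cast_add, Nat.cast_one]
    · have hncl : pvIsCl (msg.toList.getD k ' ') = false := by
        simp only [pvIsCl, Bool.or_eq_false_iff, beq_eq_false_iff_ne, ne_eq]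
        exact ⟨fun h => hc1 (Or.inl h), fun h => hc1 (Or.inr h)⟩
      rw [if_neg hc1]
      by_cases hx : (1 ≤ k ∧ pvIsCl (msg.toList.getD (k - 1) ' ') = true)
          ∧ (msg.toList.getD k ' ' = '[' ∨ msg.toList.getD k ' ' = '{')
      · -- cut at index k
        have hop : pvIsOp (msg.toList.getD k ' ') = true := by
          rcases hx.2 with h | h <;> rw [h] <;> decide
        have hcut : pvCut msg.toList k = true := by
          unfold pvCut pvP; rw [hop, hx.1.2]; simp [hx.1.1]
        have hb : pvBnds msg.toList (k + 1) = pvBnds msg.toList k ++ [(k : Int)] := by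
          simp [pvBnds, pvCutsSucc, hcut]
        rw [if_pos hx.1, if_pos (⟨one_ne_zero, hx.2⟩ :
          (1 : Int) ≠ 0 ∧ (msg.toList.getD k ' ' = '[' ∨ msg.toList.getD k ' ' = '{'))]
        rw [hb]
        unfold pvBnds
        rw [pvSegsApp,
          if_neg (show ¬ (1 ≤ k + 1 ∧ pvIsCl (msg.toList.getD k ' ') = true) from
            fun hcon => absurd hcon.2 (by rw [hncl]; simp)),
          Nat.cast_add, Nat.cast_one, List.getLastD_concat]
        split_ifs with hz
        · rw [hz]
          simp [PySem.Str.slice]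
        · rfl
      · -- no cut at index k
        have hcut : pvCut msg.toList k = false := by
          by_cases hop : msg.toList.getD k ' ' = '[' ∨ msg.toList.getD k ' ' = '{'
          · rcases Bool.eq_false_or_eq_true (pvIsCl (msg.toList.getD (k - 1) ' ')) with h | h
            · by_cases h2 : 1 ≤ k
              · exact absurd ⟨⟨h2, h⟩, hop⟩ hx
              · unfold pvCut
                have hzero : k = 0 := by omega
                simp [hzero]
            · unfold pvCut pvP; rw [h]; simp
          · have hopf : pvIsOp (msg.toList.getD k ' ') = false := by
              simp only [pvIsOp, Bool.or_eq_false_iff, beq_eq_false_iff_ne, ne_eq]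
              exact ⟨fun h => hop (Or.inl h), fun h => hop (Or.inr h)⟩
            unfold pvCut pvP; rw [hopf]; simp
        have hb : pvBnds msg.toList (k + 1) = pvBnds msg.toList k := by
          simp [pvBnds, pvCutsSucc, hcut]
        have hx2 : ¬ ((if 1 ≤ k ∧ pvIsCl (msg.toList.getD (k - 1) ' ') = true then (1 : Int) else 0) ≠ 0
            ∧ (msg.toList.getD k ' ' = '[' ∨ msg.toList.getD k ' ' = '{')) := by
          split_ifs with h
          · exact fun hcon => hx ⟨h, hcon.2⟩
          · exact fun hcon => hcon.1 rfl
        rw [if_neg hx2, hb,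
          if_neg (show ¬ (1 ≤ k + 1 ∧ pvIsCl (msg.toList.getD k ' ') = true) from
            fun hcon => absurd hcon.2 (by rw [hncl]; simp)),
          Nat.cast_add, Nat.cast_one]

-- A's port evaluates to the slice list over the cut bounds
theorem pvAEq (msg : String) :
    uncompose_msg msg
      = pvSegs msg (pvBnds msg.toList msg.toList.length ++ [(msg.toList.length : Int)]) := by
  unfold uncompose_msg
  dsimp only []
  have h := pvInvA msg msg.toList.length le_rfl
  rw [List.take_length] at h
  rw [h]
  dsimp only []
  unfold pvBnds
  rw [pvSegsApp]

-- ---- B side ----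

theorem pvAltCutEq (cs : List Char) :
    altCut cs = (List.range' 1 (cs.length - 1)).find? (pvP cs) := rfl

theorem pvCutsRange' (cs : List Char) :
    pvCuts cs cs.length = (List.range' 1 (cs.length - 1)).filter (pvP cs) := by
  cases hn : cs.length with
  | zero => simp [pvCuts]
  | succ m =>
    unfold pvCuts
    rw [List.range_eq_range', List.range'_succ, List.filter_cons]
    have h0 : pvCut cs 0 = false := by simp [pvCut]
    rw [h0]
    simp only [Bool.false_eq_true, if_false, Nat.add_sub_cancel]
    apply List.filter_congr
    intro i hi
    rw [List.mem_range'_1] at hi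
    simp [pvCut, hi.1]

theorem pvAltCutHead (cs : List Char) :
    altCut cs = (pvCuts cs cs.length).head? := by
  rw [pvAltCutEq, pvCutsRange', List.head?_filter]

theorem pvPDrop (cs : List Char) (k j : Nat) (hj : 1 ≤ j) :
    pvP (cs.drop k) j = pvP cs (k + j) := by
  unfold pvP
  have h1 : (cs.drop k).getD (j - 1) ' ' = cs.getD (k + j - 1) ' ' := by
    rw [List.getD_eq_getElem?_getD, List.getD_eq_getElem?_getD, List.getElem?_drop,
      show k + (j - 1) = k + j - 1 by omega]
  have h2 : (cs.drop k).getD j ' ' = cs.getD (k + j) ' ' := by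
    rw [List.getD_eq_getElem?_getD, List.getD_eq_getElem?_getD, List.getElem?_drop]
  rw [h1, h2]

theorem pvCutsNone {cs : List Char} (h : altCut cs = none) :
    pvCuts cs cs.length = [] := by
  have := pvAltCutHead cs
  rw [h] at this
  exact List.head?_eq_none_iff.mp this.symm

theorem pvCutsSome {cs : List Char} {k : Nat} (h : altCut cs = some k) :
    pvCuts cs cs.length = k :: (pvCuts (cs.drop k) (cs.drop k).length).map (· + k) := by
  obtain ⟨hk1, hk2⟩ := pvAltCutBounds h
  have hpk : pvP cs k = true := List.find?_some h
  -- split range' 1 (n-1) at k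
  have hsplit : List.range' 1 (cs.length - 1)
      = List.range' 1 (k - 1) ++ List.range' k (cs.length - k) := by
    have : List.range' 1 (k - 1) ++ List.range' (1 + 1 * (k - 1)) (cs.length - 1 - (k - 1))
        = List.range' 1 ((k - 1) + (cs.length - 1 - (k - 1))) := List.range'_append
    rw [show 1 + 1 * (k - 1) = k by omega, show cs.length - 1 - (k - 1) = cs.length - k by omega]
      at this
    rw [show cs.length - 1 = (k - 1) + (cs.length - k) by omega]
    exact this.symm
  have hfilter1 : (List.range' 1 (k - 1)).filter (pvP cs) = [] := by
    -- all indices before the first found cut fail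
    cases hf : (List.range' 1 (k - 1)).filter (pvP cs) with
    | nil => rfl
    | cons x xs =>
      exfalso
      have hxmem : x ∈ (List.range' 1 (k - 1)).filter (pvP cs) := by rw [hf]; exact List.mem_cons_self
      have hx := List.mem_filter.mp hxmem
      have hxlt : x < k := by
        have := List.mem_range'_1.mp hx.1
        omega
      -- head of the whole filter is x, but find? = some k
      have : ((List.range' 1 (cs.length - 1)).filter (pvP cs)).head? = some x := by
        rw [hsplit, List.filter_append, hf]
        simp
      rw [List.head?_filter, ← pvAltCutEq, h] at this
      have := Option.some.inj this
      omega
  have hrest : List.range' k (cs.length - k) = k :: List.range' (k + 1) (cs.length - k - 1) := by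
    rw [show cs.length - k = (cs.length - k - 1) + 1 by omega, List.range'_succ]
    simp
  have hshift : (List.range' (k + 1) (cs.length - k - 1)).filter (pvP cs)
      = ((List.range' 1 (cs.length - k - 1)).filter (pvP (cs.drop k))).map (· + k) := by
    have hmap : List.range' (k + 1) (cs.length - k - 1)
        = (List.range' 1 (cs.length - k - 1)).map (· + k) := by
      rw [List.range'_eq_map_range, List.range'_eq_map_range, List.map_map]
      apply List.map_congr_left
      intro x _
      simp [Function.comp]
      omega
    rw [hmap, List.filter_map]
    congr 1
    apply List.filter_congr
    intro j hj
    have hj1 := (List.mem_range'_1.mp hj).1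
    simp only [Function.comp]
    rw [pvPDrop cs k j hj1, Nat.add_comm k j]
  rw [pvCutsRange', hsplit, List.filter_append, hfilter1, List.nil_append, hrest,
    List.filter_cons, hpk]
  simp only [if_pos trivial]
  rw [hshift]
  congr 1
  rw [pvCutsRange' (cs.drop k)]
  congr 2
  simp
theorem pvShiftChunks (cs : List Char) (k : Nat) (cuts : List Nat) : ∀ (off : Nat),
    pvChunksA cs (off + k) (cuts.map (· + k)) = pvChunksA (cs.drop k) off cuts := by
  induction cuts with
  | nil =>
    intro off
    simp [pvChunksA, List.drop_drop, Nat.add_comm]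
  | cons c rest ih =>
    intro off
    simp only [List.map_cons, pvChunksA, List.drop_drop]
    rw [show k + off = off + k by omega, show c + k - (off + k) = c - off by omega, ih c]

theorem pvAltGoEq (cs : List Char) (parts : List String) :
    altGo cs parts = parts ++ pvChunksA cs 0 (pvCuts cs cs.length) := by
  induction cs, parts using altGo.induct with
  | case1 cs parts h =>
    rw [altGo, h]
    show parts ++ [String.ofList cs] = _
    rw [pvCutsNone h]
    simp [pvChunksA]
  | case2 cs parts i h ih =>
    rw [altGo, h]
    show altGo (cs.drop i) (parts ++ [String.ofList (cs.take i)]) = _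
    rw [ih, pvCutsSome h, pvChunksA]
    have := pvShiftChunks cs i (pvCuts (cs.drop i) (cs.drop i).length) 0
    rw [Nat.zero_add] at this
    rw [this]
    simp

-- the take/drop segment list over absolute bounds equals the offset chunk recursion
theorem pvChunksEq (cs : List Char) (cuts : List Nat) : ∀ (off : Nat),
    pvSegsTD cs (off :: cuts ++ [cs.length]) = pvChunksA cs off cuts := by
  induction cuts with
  | nil =>
    intro off
    have h1 : (off :: [] ++ [cs.length] : List Nat) = [off, cs.length] := by simp
    rw [h1]
    unfold pvSegsTD pvChunksA
    simp only [List.zip_cons_cons, List.zip_nil_right, List.tail_cons, List.map_cons,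
      List.map_nil]
    rw [List.take_of_length_le (le_of_eq (List.length_drop))]
  | cons c rest ih =>
    intro off
    have hrec := ih c
    simp only [pvSegsTD, pvChunksA, List.cons_append, List.zip_cons_cons, List.tail_cons,
      List.map_cons] at hrec ⊢
    rw [hrec]

-- Int slices over cast bounds are take/drop segments
theorem pvSegsCast (msg : String) (bs : List Nat) :
    pvSegs msg (bs.map (Nat.cast)) = pvSegsTD msg.toList bs := by
  unfold pvSegs pvSegsTD
  rw [show (bs.map (Nat.cast : Nat → Int)).tail = bs.tail.map (Nat.cast) by
    cases bs <;> simp]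
  rw [List.zip_map, List.map_map]
  apply List.map_congr_left
  intro p _
  simp only [Prod.map, Function.comp]
  apply String.ext
  simp [pysem, PySem.List.slice_natCast]

-- ===== VERDICT (by name: the statement is the Claim_ definition above) =====
theorem uncompose_msg_spec : Claim_equal_uncompose_msg := by
  intro msg _
  unfold Spec_uncompose_msg
  rw [pvAEq]
  unfold uncompose_msg_alt
  rw [pvAltGoEq, List.nil_append]
  rw [← pvChunksEq msg.toList _ 0]
  rw [← pvSegsCast]
  congr 1
  unfold pvBnds
  simp
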